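-- pv_equiv track=rewrite | github.com/microsoft/muzic | songmass/evaluate/evaluate_histo.py | get_pitch_duration_sequence
-- ===== SOURCE A (Python) =====
-- def get_pitch_duration_sequence(notes):
--     seq = []
--
--     i = 0
--     while i < len(notes):
--         if notes[i] > 128:
--             i += 1
--         else:
--             if i + 1 >= len(notes):
--                 break
--             if notes[i + 1] <= 128:
--                 i += 1
--             else:
--                 pitch = str(notes[i])
--                 duration = str(notes[i + 1])
--
--                 seq.extend([pitch, duration])
--                 i += 2
--     return seq
-- ===== SOURCE B (Python) =====
-- def get_pitch_duration_sequence(notes):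
--     return [str(x)
--             for a, b in zip(notes, notes[1:])
--             if a <= 128 and b > 128
--             for x in (a, b)]
-- ===== Notes on version B (the rewrite author's own statement) =====
-- stated objective: simpler
-- what changed: Replaces the index/state-machine while-loop (variable stride, break) by one comprehension over adjacent pairs keeping exactly the pairs with a<=128 and b>128; a duration token can never start a pair, so the stride is redundant.
import Mathlib
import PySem

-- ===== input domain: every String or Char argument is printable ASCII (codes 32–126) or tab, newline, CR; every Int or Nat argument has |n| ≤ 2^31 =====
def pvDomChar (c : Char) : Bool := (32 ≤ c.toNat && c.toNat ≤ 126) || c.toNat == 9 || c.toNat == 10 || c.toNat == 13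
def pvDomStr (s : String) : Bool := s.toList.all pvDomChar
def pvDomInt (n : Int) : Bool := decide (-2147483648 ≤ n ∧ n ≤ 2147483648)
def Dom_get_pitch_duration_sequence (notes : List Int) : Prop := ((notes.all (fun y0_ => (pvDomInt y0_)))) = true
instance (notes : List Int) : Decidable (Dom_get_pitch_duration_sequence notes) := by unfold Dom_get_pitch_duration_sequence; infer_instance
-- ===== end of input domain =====

-- B replaces A's index/state-machine while-loop by a uniform filter over adjacent pairs (simpler).

-- ===== PORT A =====
-- A's while-loop over index i, transcribed as structural recursion on the suffix
-- starting at i: 'i += 1' recurses on the tail, 'i += 2' drops two elements,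
-- the 'break' returns the empty rest.
def get_pitch_duration_sequence (notes : List Int) : List String :=
  match notes with
  | [] => []                                   -- i = len(notes): loop ends
  | a :: rest =>
    if a > 128 then
      get_pitch_duration_sequence rest         -- i += 1
    else
      match rest with
      | [] => []                               -- i + 1 >= len(notes): break
      | b :: rest2 =>
        if b ≤ 128 then
          get_pitch_duration_sequence (b :: rest2)   -- i += 1
        else
          PySem.Int.toStr a :: PySem.Int.toStr b ::
            get_pitch_duration_sequence rest2        -- seq.extend(...); i += 2

-- ===== PORT B =====
-- B: comprehension over zip(notes, notes[1:]) emitting str(a), str(b) for each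
-- pair with a <= 128 and b > 128.
def get_pitch_duration_sequence_alt (notes : List Int) : List String :=
  (List.zip notes notes.tail).foldr
    (fun p acc =>
      if p.1 ≤ 128 ∧ p.2 > 128 then
        PySem.Int.toStr p.1 :: PySem.Int.toStr p.2 :: acc
      else acc) []

-- ===== PRECONDITION & SPEC =====
def Spec_get_pitch_duration_sequence (notes : List Int) (out : List String) : Prop := out = get_pitch_duration_sequence_alt notes
instance (notes : List Int) (out : List String) : Decidable (Spec_get_pitch_duration_sequence notes out) := by unfold Spec_get_pitch_duration_sequence; infer_instance

-- ===== CLAIM (what is proved, stated in full; the proofs are below) =====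
def Claim_equal_get_pitch_duration_sequence : Prop := ∀ (notes : List Int), Dom_get_pitch_duration_sequence notes → Spec_get_pitch_duration_sequence notes (get_pitch_duration_sequence notes)

-- ===== LEMMAS AND PROOFS =====

-- A pair starting with a duration token (> 128) is filtered out, so B ignores a leading one.
theorem alt_cons_gt (b : Int) (rest : List Int) (h : b > 128) :
    get_pitch_duration_sequence_alt (b :: rest) = get_pitch_duration_sequence_alt rest := by
  cases rest with
  | nil => rfl
  | cons r rs =>
    simp only [get_pitch_duration_sequence_alt, List.tail_cons, List.zip_cons_cons, List.foldr]
    rw [if_neg (by omega)]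

theorem a_eq_alt (notes : List Int) :
    get_pitch_duration_sequence notes = get_pitch_duration_sequence_alt notes := by
  induction notes using get_pitch_duration_sequence.induct with
  | case1 => rfl
  | case2 a rest h ih =>
    rw [get_pitch_duration_sequence.eq_def]
    simp only []
    rw [if_pos h, ih, alt_cons_gt a rest h]
  | case3 a h =>
    rw [get_pitch_duration_sequence.eq_def]
    simp only []
    rw [if_neg h]
    rfl
  | case4 a hna b rest2 hb ih =>
    rw [get_pitch_duration_sequence.eq_def]
    simp only []
    rw [if_neg hna, if_pos hb, ih]
    simp only [get_pitch_duration_sequence_alt, List.tail_cons, List.zip_cons_cons, List.foldr]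
    rw [if_neg (by omega)]
  | case5 a hna b rest2 hb ih =>
    rw [get_pitch_duration_sequence.eq_def]
    simp only []
    rw [if_neg hna, if_neg hb, ih]
    simp only [get_pitch_duration_sequence_alt, List.tail_cons, List.zip_cons_cons, List.foldr]
    rw [if_pos (by constructor <;> omega)]
    have h2 := alt_cons_gt b rest2 (by omega)
    simp only [get_pitch_duration_sequence_alt, List.tail_cons] at h2
    rw [h2]

-- ===== VERDICT (by name: the statement is the Claim_ definition above) =====
theorem get_pitch_duration_sequence_spec : Claim_equal_get_pitch_duration_sequence := by
  intro notes _
  exact a_eq_alt notes
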